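-- pv_equiv track=rewrite | github.com/muppet2011ad/ct-ecc-cwork-1920 | jsbl33.py | decimalToVector
-- ===== SOURCE A (Python) =====
-- def decimalToVector(i, l):  # Takes a decimal number and converts it to its vector representation
--     vect = []  # Construct an empty list for the vector
--     while len(vect) < l:  # Whilst the vector we have is too short
--         if i % 2 == 0:  # If i modulo 2 is zero
--             vect.append(0)  # Append 0
--         else:
--             vect.append(1)  # Otherwise append 1
--         i = i // 2  # Divided i by 2 and round down
--     return vect[::-1]  # Flip the order of the vector to get the LSB on the right
-- ===== SOURCE B (Python) =====
-- def decimalToVector(i, l):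
--     # Each output bit is computed independently from the original i by its
--     # position (high to low), instead of peeling LSBs off a shrinking quotient.
--     return [(i >> b) & 1 for b in range(l - 1, -1, -1)]
-- ===== Notes on version B (the rewrite author's own statement) =====
-- stated objective: alternative
-- what changed: B computes each output bit independently from the original i as (i >> b) & 1 over bit positions high-to-low, replacing A's stateful loop that peels LSBs off a shrinking quotient into a list that is reversed at the end.
import Mathlib
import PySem

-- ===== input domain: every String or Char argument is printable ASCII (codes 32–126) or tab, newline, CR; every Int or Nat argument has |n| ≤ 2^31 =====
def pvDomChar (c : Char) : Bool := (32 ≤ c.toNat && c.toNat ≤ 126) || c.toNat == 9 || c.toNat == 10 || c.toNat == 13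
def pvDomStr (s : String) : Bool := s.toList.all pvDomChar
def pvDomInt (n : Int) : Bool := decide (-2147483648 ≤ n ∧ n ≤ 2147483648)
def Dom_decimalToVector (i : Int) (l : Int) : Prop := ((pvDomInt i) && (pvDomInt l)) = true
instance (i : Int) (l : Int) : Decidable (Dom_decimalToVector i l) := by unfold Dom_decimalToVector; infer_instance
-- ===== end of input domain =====

-- B replaces A's LSB-peeling loop (shrinking quotient + final reversal) by computing each
-- bit independently from the original i via (i >> b) & 1 over positions high-to-low (alternative).

-- ===== PORT A =====
-- while len(vect) < l: the loop runs exactly (l - 0).toNat times; fuel counts the remaining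
-- iterations, vect is the accumulator, exactly as in A.
def decToVecGo : Nat → Int → List Int → List Int
  | 0, _, vect => vect
  | n + 1, i, vect =>
      decToVecGo n (PySem.Int.floordiv i 2)
        (vect ++ [if PySem.Int.mod i 2 = 0 then (0 : Int) else 1])

def decimalToVector (i : Int) (l : Int) : List Int :=
  -- vect = []; while len(vect) < l: …; return vect[::-1]  (xs[::-1] = List.reverse)
  (decToVecGo l.toNat i []).reverse

-- ===== PORT B =====
-- (i >> b) & 1 for integer b ≥ 0 (all b in this range are ≥ 0) is exactly
-- floor-division of i by 2^b followed by mod 2; exact for negative i too.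
def decimalToVector_alt (i : Int) (l : Int) : List Int :=
  (PySem.List.pyRange (l - 1) (-1) (-1)).map
    (fun b => PySem.Int.mod (PySem.Int.floordiv i (2 ^ b.toNat)) 2)

-- ===== PRECONDITION & SPEC =====
def Spec_decimalToVector (i : Int) (l : Int) (out : List Int) : Prop := out = decimalToVector_alt i l
instance (i : Int) (l : Int) (out : List Int) : Decidable (Spec_decimalToVector i l out) := by unfold Spec_decimalToVector; infer_instance

-- ===== CLAIM (what is proved, stated in full; the proofs are below) =====
def Claim_equal_decimalToVector : Prop := ∀ (i : Int) (l : Int), Dom_decimalToVector i l → Spec_decimalToVector i l (decimalToVector i l)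

-- ===== LEMMAS AND PROOFS =====

-- the b-th bit of i, as B computes it
def pvBit (i : Int) (b : Nat) : Int := PySem.Int.mod (PySem.Int.floordiv i (2 ^ b)) 2

lemma pvBit_succ (i : Int) (b : Nat) :
    pvBit (PySem.Int.floordiv i 2) b = pvBit i (b + 1) := by
  simp only [pvBit, PySem.Int.floordiv]
  rw [Int.fdiv_fdiv_eq_fdiv_mul _ (by norm_num) (by positivity)]
  ring_nf

-- A's accumulated vector is the list of bits 0 .. n-1 of i, appended to vect
lemma decToVecGo_eq (n : Nat) (i : Int) (vect : List Int) :
    decToVecGo n i vect = vect ++ (List.range n).map (pvBit i) := by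
  induction n generalizing i vect with
  | zero => simp [decToVecGo]
  | succ n ih =>
      rw [decToVecGo, ih]
      have h0 : (if PySem.Int.mod i 2 = 0 then (0 : Int) else 1) = pvBit i 0 := by
        simp only [pvBit, pow_zero, PySem.Int.floordiv, Int.fdiv_one]
        rcases PySem.Int.mod_two_eq i with h | h <;> rw [h] <;> simp
      rw [h0, List.range_succ_eq_map, List.map_cons, List.map_map, List.append_assoc,
        List.singleton_append]
      congr 2
      apply List.map_congr_left
      intro a _
      simp only [Function.comp_apply]
      exact pvBit_succ i a

lemma alt_eq_map (i : Int) (l : Int) :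
    decimalToVector_alt i l =
      ((List.range l.toNat).map (fun k => pvBit i (l.toNat - 1 - k))) := by
  unfold decimalToVector_alt
  rw [PySem.List.pyRange_neg_one]
  have hlen : (l - 1 - (-1)).toNat = l.toNat := by omega
  rw [hlen, List.map_map]
  apply List.map_congr_left
  intro k hk
  simp only [List.mem_range] at hk
  have he : (l - 1 - (k : Int)).toNat = l.toNat - 1 - k := by omega
  simp only [Function.comp, pvBit, he]

lemma pvRevMapRange (f : Nat → Int) (n : Nat) :
    (List.map f (List.range n)).reverse = List.map (fun k => f (n - 1 - k)) (List.range n) := by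
  induction n with
  | zero => simp
  | succ n ih =>
      conv_lhs => rw [List.range_succ]
      conv_rhs => rw [List.range_succ_eq_map (n := n)]
      simp only [List.map_append, List.reverse_append, List.map_cons, List.map_map,
        List.map_nil, List.reverse_cons, List.reverse_nil, List.nil_append,
        List.singleton_append]
      rw [ih]
      congr 1
      apply List.map_congr_left
      intro k _
      simp only [Function.comp_apply]
      congr 1
      omega

theorem decimalToVector_spec_aux (i : Int) (l : Int) :
    decimalToVector i l = decimalToVector_alt i l := by
  rw [alt_eq_map]
  unfold decimalToVector
  rw [decToVecGo_eq]
  simp only [List.nil_append]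
  exact pvRevMapRange (pvBit i) l.toNat

-- ===== VERDICT (by name: the statement is the Claim_ definition above) =====
theorem decimalToVector_spec : Claim_equal_decimalToVector := by
  intro i l _
  unfold Spec_decimalToVector
  exact decimalToVector_spec_aux i l
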